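-- pv_equiv track=rewrite | github.com/Sitthisak123/ebpf_wt | tools/sub/bomb_runtime_watch.py | _is_bomb_semantic_blob
-- ===== SOURCE A (Python) =====
-- def _is_bomb_semantic_blob(blob):
--     blob = str(blob or "").lower()
--     keys = (
--         "bomb",
--         "pylon",
--         "ammo",
--         "weapon",
--         "count",
--         "preset",
--         "loadout",
--         "mask",
--     )
--     return any(k in blob for k in keys)
-- ===== SOURCE B (Python) =====
-- def _is_bomb_semantic_blob(blob):
--     blob = str(blob or "").lower()
--     keys = (
--         "bomb",
--         "pylon",
--         "ammo",
--         "weapon",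
--         "count",
--         "preset",
--         "loadout",
--         "mask",
--     )
--     # single left-to-right scan: at each position, try each alternative as a prefix
--     for i in range(len(blob)):
--         for k in keys:
--             if blob.startswith(k, i):
--                 return True
--     return False
-- ===== Notes on version B (the rewrite author's own statement) =====
-- stated objective: alternative
-- what changed: Instead of running eight independent whole-string substring membership scans (one per keyword), B makes a single left-to-right pass over the positions of the string and at each position tests every keyword as a prefix, alternation-search style.
import Mathlib
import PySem

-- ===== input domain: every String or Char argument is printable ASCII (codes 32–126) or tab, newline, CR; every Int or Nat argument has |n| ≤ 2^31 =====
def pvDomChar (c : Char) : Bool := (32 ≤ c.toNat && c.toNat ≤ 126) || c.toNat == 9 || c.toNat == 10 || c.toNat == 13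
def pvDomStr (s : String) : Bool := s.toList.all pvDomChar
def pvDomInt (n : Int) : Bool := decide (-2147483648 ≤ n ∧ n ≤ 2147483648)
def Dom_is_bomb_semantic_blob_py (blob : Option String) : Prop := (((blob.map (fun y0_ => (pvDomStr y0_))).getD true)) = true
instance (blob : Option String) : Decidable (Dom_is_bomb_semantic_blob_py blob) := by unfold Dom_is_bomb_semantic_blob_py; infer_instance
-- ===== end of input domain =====

-- B replaces eight independent substring scans with one left-to-right positional scan
-- testing each keyword as a prefix at the current position; return value equivalence only.
-- ===== PORT A =====
def pvKeysA : List String :=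
  ["bomb", "pylon", "ammo", "weapon", "count", "preset", "loadout", "mask"]

def is_bomb_semantic_blob_py (blob : Option String) : Bool :=
  -- blob = str(blob or "").lower(); 'None or ""' and '"" or ""' both give ""
  let b := PySem.Str.lower (blob.getD "")
  pvKeysA.any (fun k => PySem.Str.isIn k b)

-- ===== PORT B =====
def pvKeysB : List String :=
  ["bomb", "pylon", "ammo", "weapon", "count", "preset", "loadout", "mask"]

-- the scan over positions i in range(len(blob)); blob.startswith(k, i) with 0 ≤ i ≤ len
-- is exactly Chars.startswith on the i-th suffix, so we recurse over suffixes
def pvScan : List Char → Bool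
  | [] => false
  | c :: rest => pvKeysB.any (fun k => PySem.Chars.startswith (c :: rest) k.toList) || pvScan rest

def is_bomb_semantic_blob_py_alt (blob : Option String) : Bool :=
  let b := PySem.Str.lower (blob.getD "")
  pvScan b.toList

-- ===== PRECONDITION & SPEC =====
def Spec_is_bomb_semantic_blob_py (blob : Option String) (out : Bool) : Prop := out = is_bomb_semantic_blob_py_alt blob
instance (blob : Option String) (out : Bool) : Decidable (Spec_is_bomb_semantic_blob_py blob out) := by unfold Spec_is_bomb_semantic_blob_py; infer_instance

-- ===== CLAIM (what is proved, stated in full; the proofs are below) =====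
def Claim_equal_is_bomb_semantic_blob_py : Prop := ∀ (blob : Option String), Dom_is_bomb_semantic_blob_py blob → Spec_is_bomb_semantic_blob_py blob (is_bomb_semantic_blob_py blob)

-- ===== LEMMAS AND PROOFS =====



theorem pvScan_iff (cs : List Char) :
    pvScan cs = true ↔ ∃ k ∈ pvKeysB, k.toList <:+: cs := by
  induction cs with
  | nil =>
    simp only [pvScan, Bool.false_eq_true, false_iff]
    decide
  | cons c rest ih =>
    simp only [pvScan, Bool.or_eq_true, List.any_eq_true,
      PySem.Chars.startswith_iff, ih]
    constructor
    · rintro (⟨k, hk, hp⟩ | ⟨k, hk, hi⟩)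
      · exact ⟨k, hk, hp.isInfix⟩
      · exact ⟨k, hk, hi.trans (List.suffix_cons c rest).isInfix⟩
    · rintro ⟨k, hk, hi⟩
      rcases List.infix_cons_iff.mp hi with hp | hi'
      · exact Or.inl ⟨k, hk, hp⟩
      · exact Or.inr ⟨k, hk, hi'⟩

theorem is_bomb_semantic_blob_py_spec : Claim_equal_is_bomb_semantic_blob_py := by
  intro blob _
  unfold Spec_is_bomb_semantic_blob_py is_bomb_semantic_blob_py is_bomb_semantic_blob_py_alt
  rw [Bool.eq_iff_iff, pvScan_iff]
  simp only [List.any_eq_true, PySem.Str.isIn_iff_infix, PySem.Str.toList_lower]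
  show (∃ k ∈ pvKeysA, _) ↔ (∃ k ∈ pvKeysB, _)
  rfl
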